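-- pv_equiv track=rewrite | github.com/Dhirajkumar55/volopay_assignment | seats_allocation.py | transform
-- ===== SOURCE A (Python) =====
-- def transform(arr, rows):
--     temp = [[] for _ in range(rows)]
--
--     for i in arr:
--         temp[i[1]].append(i)
--
--     arr = []
--
--     for i in temp:
--         for j in i:
--             arr.append(j)
--
--     return arr
-- ===== SOURCE B (Python) =====
-- def transform(arr, rows):
--     # Counting sort by column 1: count occurrences per bucket, turn the counts
--     # into starting offsets by a running prefix sum, then place each row
--     # directly at its final position in a preallocated output list.
--     count = [0] * rows
--     for row in arr:
--         count[row[1]] += 1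
--     pos = []
--     total = 0
--     for c in count:
--         pos.append(total)
--         total += c
--     out = [None] * len(arr)
--     for row in arr:
--         out[pos[row[1]]] = row
--         pos[row[1]] += 1
--     return out
-- ===== Notes on version B (the rewrite author's own statement) =====
-- stated objective: alternative
-- what changed: Replaces the bucket-lists-then-flatten pass with a counting sort: one pass tallies per-bucket counts, a prefix-sum pass turns them into starting offsets, and a final pass writes each row directly at its final position in a preallocated output list, so no intermediate per-bucket lists are built.
import Mathlib
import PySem

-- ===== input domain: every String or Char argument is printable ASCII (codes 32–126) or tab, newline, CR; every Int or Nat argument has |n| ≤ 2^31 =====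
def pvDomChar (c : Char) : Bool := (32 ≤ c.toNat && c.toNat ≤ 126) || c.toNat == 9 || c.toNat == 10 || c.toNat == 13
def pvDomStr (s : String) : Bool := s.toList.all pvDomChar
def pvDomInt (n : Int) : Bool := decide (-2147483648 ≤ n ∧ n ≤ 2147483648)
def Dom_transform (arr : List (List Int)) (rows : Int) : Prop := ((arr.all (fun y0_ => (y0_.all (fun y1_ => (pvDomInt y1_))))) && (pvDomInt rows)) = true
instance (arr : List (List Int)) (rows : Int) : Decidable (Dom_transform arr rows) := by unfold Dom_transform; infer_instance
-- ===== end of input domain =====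

-- B replaces A's bucket-lists-then-flatten with a counting sort (counts, prefix-sum offsets,
-- direct placement into a preallocated output): an alternative algorithm of the same cost.


-- ===== PORT A =====
-- temp = [[] for _ in range(rows)]; temp[i[1]].append(i); then flatten.
-- i[1] and temp[i[1]] are ported with pyGetD/pySetD (total forms of Python indexing,
-- including negative-index wraparound); Pre_transform restricts to the inputs where
-- the Python indexing succeeds, so the defaults are never taken there.
def transform (arr : List (List Int)) (rows : Int) : List (List Int) :=
  let temp : List (List (List Int)) := (PySem.List.pyRange 0 rows 1).map (fun _ => [])
  let temp := arr.foldl (fun t i =>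
    PySem.List.pySetD t (PySem.List.pyGetD i 1 0)
      (PySem.List.pyGetD t (PySem.List.pyGetD i 1 0) [] ++ [i])) temp
  temp.foldl (fun a i => i.foldl (fun a j => a ++ [j]) a) []

-- ===== PORT B =====
-- counting sort: per-bucket counts, prefix sums as starting offsets, direct placement.
-- [None]*len(arr) is ported as a placeholder list of []s (every placeholder is
-- overwritten under Pre_transform); indexing again via the total pyGetD/pySetD.
def transform_alt (arr : List (List Int)) (rows : Int) : List (List Int) :=
  let count : List Int := List.replicate rows.toNat 0   -- [0] * rows ([] for rows ≤ 0)
  let count := arr.foldl (fun c row =>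
    PySem.List.pySetD c (PySem.List.pyGetD row 1 0)
      (PySem.List.pyGetD c (PySem.List.pyGetD row 1 0) 0 + 1)) count
  let pt := count.foldl (fun (pt : List Int × Int) c => (pt.1 ++ [pt.2], pt.2 + c)) ([], 0)
  let st := arr.foldl (fun (st : List (List Int) × List Int) row =>
    let q := PySem.List.pyGetD st.2 (PySem.List.pyGetD row 1 0) 0
    (PySem.List.pySetD st.1 q row,
     PySem.List.pySetD st.2 (PySem.List.pyGetD row 1 0) (q + 1)))
    (List.replicate arr.length [], pt.1)
  st.1

-- ===== PRECONDITION & SPEC =====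
-- Pre_transform admits exactly the inputs where the Python A returns: rows may be
-- negative only when arr is empty (range(rows) is then empty and no indexing happens),
-- every row needs an element at index 1, and that bucket index must be a valid Python
-- index into a list of length rows (IndexError otherwise).
def Pre_transform (arr : List (List Int)) (rows : Int) : Prop :=
  (arr = [] ∨ 0 ≤ rows) ∧
  ∀ x ∈ arr, 2 ≤ x.length ∧ -rows ≤ PySem.List.pyGetD x 1 0 ∧ PySem.List.pyGetD x 1 0 < rows
instance (arr : List (List Int)) (rows : Int) : Decidable (Pre_transform arr rows) := by
  unfold Pre_transform; infer_instance

def pvWitness_transform : List (List Int) × Int := ([[10, 0], [20, 1], [30, 0], [40, -2]], 2)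

def Spec_transform (arr : List (List Int)) (rows : Int) (out : List (List Int)) : Prop := out = transform_alt arr rows
instance (arr : List (List Int)) (rows : Int) (out : List (List Int)) : Decidable (Spec_transform arr rows out) := by unfold Spec_transform; infer_instance

-- ===== CLAIM (what is proved, stated in full; the proofs are below) =====
def Claim_equal_transform : Prop := ∀ (arr : List (List Int)) (rows : Int), Dom_transform arr rows → Pre_transform arr rows → Spec_transform arr rows (transform arr rows)

-- ===== LEMMAS AND PROOFS =====

def pvKey (x : List Int) : Int := PySem.List.pyGetD x 1 0
def pvWrapN (rows i : Int) : Nat := (if i < 0 then i + rows else i).toNat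
def pvW (rows : Int) (x : List Int) : Nat := pvWrapN rows (pvKey x)
def pvBkt (arr : List (List Int)) (rows : Int) (j : Nat) : List (List Int) :=
  arr.filter (fun x => decide (pvW rows x = j))
def pvF (arr : List (List Int)) (rows : Int) : List (List Int) :=
  ((List.range rows.toNat).map (pvBkt arr rows)).flatten
def pvS (arr : List (List Int)) (rows : Int) (j : Nat) : Nat :=
  ((List.range j).map (fun j' => (pvBkt arr rows j').length)).sum
def pvGood (arr : List (List Int)) (rows : Int) : Prop :=
  ∀ x ∈ arr, 2 ≤ x.length ∧ -rows ≤ pvKey x ∧ pvKey x < rows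

theorem pvIdx_wrap (rows i : Int) (h0 : 0 ≤ rows) (h1 : -rows ≤ i) (h2 : i < rows) :
    PySem.List.pyIdx? rows.toNat i = some (pvWrapN rows i) := by
  simp only [PySem.List.pyIdx?, pvWrapN, Int.toNat_of_nonneg h0]
  split_ifs
  all_goals (congr 1) <;> omega

theorem pvWrapN_lt (rows i : Int) (h0 : 0 ≤ rows) (h1 : -rows ≤ i) (h2 : i < rows) :
    pvWrapN rows i < rows.toNat := by
  simp only [pvWrapN]; split_ifs <;> omega

theorem pvGetD_wrap {α : Type} (c : List α) (rows i : Int) (d : α)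
    (hlen : c.length = rows.toNat) (h0 : 0 ≤ rows) (h1 : -rows ≤ i) (h2 : i < rows) :
    PySem.List.pyGetD c i d = c.getD (pvWrapN rows i) d := by
  simp only [PySem.List.pyGetD, PySem.List.pyGet?, hlen, pvIdx_wrap rows i h0 h1 h2,
    Option.bind_some]
  rw [List.getD_eq_getElem?_getD]

theorem pvSetD_wrap {α : Type} (c : List α) (rows i : Int) (v : α)
    (hlen : c.length = rows.toNat) (h0 : 0 ≤ rows) (h1 : -rows ≤ i) (h2 : i < rows) :
    PySem.List.pySetD c i v = c.set (pvWrapN rows i) v := by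
  simp only [PySem.List.pySetD, PySem.List.pySet?, hlen, pvIdx_wrap rows i h0 h1 h2,
    Option.map_some, Option.getD_some]

theorem pvW_lt (rows : Int) (x : List Int) (h0 : 0 ≤ rows)
    (h1 : -rows ≤ pvKey x) (h2 : pvKey x < rows) : pvW rows x < rows.toNat :=
  pvWrapN_lt rows (pvKey x) h0 h1 h2

-- small utilities
theorem pvGetD_map_const {α γ : Type} (L : List γ) (c : α) (j : Nat) :
    (L.map (fun _ => c)).getD j c = c := by
  by_cases h : j < L.length
  · rw [List.getD_eq_getElem _ _ (by simpa using h)]; simp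
  · rw [List.getD_eq_default _ _ (by simpa using h)]

theorem pvEq_of_getD {α : Type} (l1 l2 : List α) (d : α) (h : l1.length = l2.length)
    (hp : ∀ j, l1.getD j d = l2.getD j d) : l1 = l2 := by
  apply List.ext_getElem h
  intro j h1 h2
  have := hp j
  rwa [List.getD_eq_getElem _ _ h1, List.getD_eq_getElem _ _ h2] at this

theorem pvSet_range_map {α : Type} (n : Nat) (f : Nat → α) (b : Nat) (v : α) (hb : b < n) :
    ((List.range n).map f).set b v = (List.range n).map (fun j => if j = b then v else f j) := by
  apply List.ext_getElem (by simp)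
  intro j h1 h2
  simp only [List.getElem_set, List.getElem_map, List.getElem_range]
  by_cases h : b = j
  · rw [if_pos h, if_pos h.symm]
  · rw [if_neg h, if_neg (fun hh => h hh.symm)]

theorem pvFoldl_const {α β : Type} (L : List α) (a : β) :
    L.foldl (fun a _ => a) a = a := by
  induction L generalizing a with
  | nil => rfl
  | cons x L ih => simpa using ih a

theorem pvFoldl_add_one {α : Type} (L : List α) (z : Int) :
    L.foldl (fun acc _ => acc + 1) z = z + L.length := by
  induction L generalizing z with
  | nil => simp
  | cons x L ih => simp [ih]; ring

theorem pvSum_map_add {γ : Type} (L : List γ) (f g : γ → Nat) :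
    (L.map (fun x => f x + g x)).sum = (L.map f).sum + (L.map g).sum := by
  induction L with
  | nil => rfl
  | cons x L ih => simp [ih]; ring

theorem pvSum_indicator (n b : Nat) (hb : b < n) :
    ((List.range n).map (fun j => if b = j then 1 else 0)).sum = 1 := by
  induction n with
  | zero => omega
  | succ n ih =>
    rw [List.range_succ, List.map_append, List.sum_append]
    by_cases h : b < n
    · rw [ih h]; simp; omega
    · have hbn : b = n := by omega
      subst hbn
      have : ((List.range b).map (fun j => if b = j then 1 else 0)).sum = 0 := by
        apply List.sum_eq_zero
        intro x hx
        simp only [List.mem_map, List.mem_range] at hx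
        obtain ⟨j, hj, rfl⟩ := hx
        simp; omega
      simp [this]

theorem pvCast_sum (L : List Nat) : (L.map (Nat.cast : Nat → Int)).sum = (L.sum : Int) := by
  induction L with
  | nil => rfl
  | cons x L ih => rw [List.map_cons, List.sum_cons, ih, List.sum_cons]; push_cast; ring

theorem pvScatter {α β : Type} (wf : α → Nat) (g : β → α → β) (d : β) :
    ∀ (u : List α) (t : List β) (j : Nat), (∀ x ∈ u, wf x < t.length) →
    ((u.foldl (fun t i => t.set (wf i) (g (t.getD (wf i) d) i)) t).getD j d)
      = (u.filter (fun x => wf x = j)).foldl g (t.getD j d) := by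
  intro u
  induction u with
  | nil => intro t j _; rfl
  | cons a u ih =>
    intro t j hw
    simp only [List.foldl_cons, List.filter_cons]
    rw [ih _ j (by intro x hx; rw [List.length_set]; exact hw x (List.mem_cons_of_mem _ hx))]
    by_cases hj : wf a = j
    · have hlt : j < t.length := hj ▸ hw a List.mem_cons_self
      have hset : (t.set (wf a) (g (t.getD (wf a) d) a)).getD j d = g (t.getD j d) a := by
        subst hj
        rw [List.getD_eq_getElem _ _ (by rw [List.length_set]; exact hlt),
            List.getD_eq_getElem _ _ hlt]
        simp
      rw [if_pos (by simpa using hj), List.foldl_cons, hset]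
    · have hset : (t.set (wf a) (g (t.getD (wf a) d) a)).getD j d = t.getD j d := by
        by_cases hjl : j < t.length
        · rw [List.getD_eq_getElem _ _ (by rw [List.length_set]; exact hjl),
              List.getD_eq_getElem _ _ hjl, List.getElem_set_ne (by omega)]
        · rw [List.getD_eq_default _ _ (by rw [List.length_set]; omega),
              List.getD_eq_default _ _ (by omega)]
      rw [if_neg (by simpa using hj), hset]

theorem pvScatter_length {α β : Type} (wf : α → Nat) (g : β → α → β) (d : β) :
    ∀ (u : List α) (t : List β),
    (u.foldl (fun t i => t.set (wf i) (g (t.getD (wf i) d) i)) t).length = t.length := by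
  intro u
  induction u with
  | nil => intro t; rfl
  | cons a u ih => intro t; rw [List.foldl_cons, ih, List.length_set]

theorem pvPrefixFold :
    ∀ (c p : List Int) (t : Int),
    c.foldl (fun (pt : List Int × Int) x => (pt.1 ++ [pt.2], pt.2 + x)) (p, t)
      = (p ++ (List.range c.length).map (fun j => t + (c.take j).sum), t + c.sum) := by
  intro c
  induction c with
  | nil => intro p t; simp
  | cons a c ih =>
    intro p t
    simp only [List.foldl_cons, ih, List.length_cons, List.range_succ_eq_map, List.map_cons,
      List.take_zero, List.sum_nil, List.map_map, List.sum_cons]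
    rw [Prod.mk.injEq]
    constructor
    · simp only [List.append_assoc, List.singleton_append, add_zero]
      congr 2
      apply List.map_congr_left
      intro j _; simp only [Function.comp_apply, List.take_succ_cons, List.sum_cons]; ring
    · ring

theorem pvFlatten_getD {α : Type} (d : α) :
    ∀ (l : List (List α)) (b t : Nat), b < l.length → t < (l.getD b []).length →
    l.flatten.getD (((l.take b).map List.length).sum + t) d = (l.getD b []).getD t d := by
  intro l
  induction l with
  | nil => intro b t hb; simp at hb
  | cons x l ih =>
    intro b t hb ht
    cases b with
    | zero =>
      have ht0 : t < x.length := by simpa using ht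
      simp only [List.take_zero, List.map_nil, List.sum_nil, Nat.zero_add, List.flatten_cons,
        List.getD_cons_zero]
      rw [List.getD_append _ _ _ _ ht0]
    | succ b =>
      have h1 : b < l.length := by simpa using hb
      have h2 : t < (l.getD b []).length := by simpa using ht
      simp only [List.take_succ_cons, List.map_cons, List.sum_cons, List.flatten_cons,
        List.getD_cons_succ]
      rw [Nat.add_assoc, List.getD_append_right _ _ _ _ (Nat.le_add_right _ _),
        Nat.add_sub_cancel_left]
      exact ih b t h1 h2

theorem pvS_succ (arr : List (List Int)) (rows : Int) (j : Nat) :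
    pvS arr rows (j + 1) = pvS arr rows j + (pvBkt arr rows j).length := by
  simp [pvS, List.range_succ]

theorem pvS_mono (arr : List (List Int)) (rows : Int) (a b : Nat) (h : a ≤ b) :
    pvS arr rows a ≤ pvS arr rows b := by
  induction b with
  | zero => rw [Nat.le_zero.mp h]
  | succ b ih =>
    rcases Nat.lt_or_ge a (b + 1) with h' | h'
    · calc pvS arr rows a ≤ pvS arr rows b := ih (by omega)
        _ ≤ _ := by rw [pvS_succ]; omega
    · have ha : a = b + 1 := by omega
      rw [ha]

theorem pvBkt_length (u : List (List Int)) (rows : Int) (j : Nat) :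
    (pvBkt u rows j).length = u.countP (fun x => decide (pvW rows x = j)) := by
  simp only [pvBkt]
  exact List.countP_eq_length_filter.symm

theorem pvS_top (arr : List (List Int)) (rows : Int)
    (hw : ∀ x ∈ arr, pvW rows x < rows.toNat) :
    pvS arr rows rows.toNat = arr.length := by
  induction arr with
  | nil => simp [pvS, pvBkt]
  | cons a arr ih =>
    have hs : ∀ j, (pvBkt (a :: arr) rows j).length
        = (pvBkt arr rows j).length + (if pvW rows a = j then 1 else 0) := by
      intro j
      simp only [pvBkt_length, List.countP_cons]
      by_cases h : pvW rows a = j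
      · simp [h]
      · simp [h]
    simp only [pvS] at *
    calc ((List.range rows.toNat).map (fun j' => (pvBkt (a :: arr) rows j').length)).sum
        = ((List.range rows.toNat).map
            (fun j' => (pvBkt arr rows j').length + (if pvW rows a = j' then 1 else 0))).sum := by
          congr 1; exact List.map_congr_left (fun j _ => hs j)
      _ = ((List.range rows.toNat).map (fun j' => (pvBkt arr rows j').length)).sum
            + ((List.range rows.toNat).map (fun j' => if pvW rows a = j' then 1 else 0)).sum :=
          pvSum_map_add _ _ _
      _ = arr.length + 1 := by
          rw [ih (fun x hx => hw x (List.mem_cons_of_mem _ hx)),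
            pvSum_indicator _ _ (hw a List.mem_cons_self)]
      _ = (a :: arr).length := by simp [Nat.add_comm]

theorem pvF_length (arr : List (List Int)) (rows : Int) :
    (pvF arr rows).length = pvS arr rows rows.toNat := by
  simp [pvF, pvS, List.length_flatten, List.map_map]
  rfl

theorem pvF_getD (arr : List (List Int)) (rows : Int) (b t : Nat)
    (hb : b < rows.toNat) (ht : t < (pvBkt arr rows b).length) :
    (pvF arr rows).getD (pvS arr rows b + t) [] = (pvBkt arr rows b).getD t [] := by
  have h1 : b < ((List.range rows.toNat).map (pvBkt arr rows)).length := by simpa using hb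
  have hgd : ((List.range rows.toNat).map (pvBkt arr rows)).getD b [] = pvBkt arr rows b := by
    rw [List.getD_eq_getElem _ _ h1]; simp
  have ht' : t < (((List.range rows.toNat).map (pvBkt arr rows)).getD b []).length := by
    rw [hgd]; exact ht
  have := pvFlatten_getD ([] : List Int) ((List.range rows.toNat).map (pvBkt arr rows)) b t h1 ht'
  rw [hgd] at this
  rw [← this]
  congr 2
  rw [← List.map_take, List.take_range, Nat.min_eq_left (by omega)]
  simp [pvS, List.map_map]
  rfl

def pvFilled (arr : List (List Int)) (rows : Int) (u : List (List Int)) (i : Nat) : Bool :=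
  (List.range rows.toNat).any (fun j => decide (pvS arr rows j ≤ i ∧
    i < pvS arr rows j + u.countP (fun x => decide (pvW rows x = j))))
def pvO (arr : List (List Int)) (rows : Int) (u : List (List Int)) : List (List Int) :=
  (List.range arr.length).map (fun i => if pvFilled arr rows u i then (pvF arr rows).getD i [] else [])
def pvP (arr : List (List Int)) (rows : Int) (u : List (List Int)) : List Int :=
  (List.range rows.toNat).map
    (fun j => ((pvS arr rows j + u.countP (fun x => decide (pvW rows x = j)) : Nat) : Int))

theorem pvFilled_nil (arr : List (List Int)) (rows : Int) (i : Nat) :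
    pvFilled arr rows [] i = false := by
  simp only [pvFilled, List.any_eq_false]
  intro j _
  simp only [List.countP_nil, Nat.add_zero, decide_eq_true_eq]
  omega

-- q = bucket b's next write position; appending a (in bucket b) fills exactly position q
theorem pvFilled_append (arr : List (List Int)) (rows : Int) (u : List (List Int))
    (a : List Int) (i : Nat) (hb : pvW rows a < rows.toNat) :
    pvFilled arr rows (u ++ [a]) i
      = (pvFilled arr rows u i ||
         decide (i = pvS arr rows (pvW rows a)
            + u.countP (fun x => decide (pvW rows x = (pvW rows a))))) := by
  rw [Bool.eq_iff_iff]
  simp only [pvFilled, List.any_eq_true, List.mem_range, decide_eq_true_eq, Bool.or_eq_true]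
  constructor
  · rintro ⟨j, hj, h1, h2⟩
    rw [List.countP_append] at h2
    by_cases hjb : pvW rows a = j
    · subst hjb
      simp only [List.countP_cons, List.countP_nil, decide_true, if_true] at h2
      rcases Nat.lt_or_ge i (pvS arr rows (pvW rows a)
          + u.countP (fun x => decide (pvW rows x = pvW rows a))) with h | h
      · exact Or.inl ⟨pvW rows a, hb, h1, h⟩
      · right; omega
    · left
      refine ⟨j, hj, h1, ?_⟩
      simp only [List.countP_cons, List.countP_nil] at h2
      rw [if_neg (by simpa using fun hh => hjb (by omega))] at h2
      omega
  · rintro (⟨j, hj, h1, h2⟩ | h)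
    · refine ⟨j, hj, h1, ?_⟩
      rw [List.countP_append]
      omega
    · refine ⟨pvW rows a, hb, by omega, ?_⟩
      rw [List.countP_append]
      simp only [List.countP_cons, List.countP_nil, decide_true, if_true]
      omega

theorem pvFilled_full (arr : List (List Int)) (rows : Int)
    (hw : ∀ x ∈ arr, pvW rows x < rows.toNat) (i : Nat) (hi : i < arr.length) :
    pvFilled arr rows arr i = true := by
  have htop : pvS arr rows rows.toNat = arr.length := pvS_top arr rows hw
  have hex : ∀ (m : Nat) (i : Nat), i < pvS arr rows m →
      ∃ j, j < m ∧ pvS arr rows j ≤ i ∧ i < pvS arr rows (j + 1) := by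
    intro m
    induction m with
    | zero => intro i hi; simp [pvS] at hi
    | succ m ih =>
      intro i hi
      rcases Nat.lt_or_ge i (pvS arr rows m) with h | h
      · obtain ⟨j, hj, h1, h2⟩ := ih i h
        exact ⟨j, by omega, h1, h2⟩
      · exact ⟨m, by omega, h, hi⟩
  obtain ⟨j, hj, h1, h2⟩ := hex rows.toNat i (by omega)
  simp only [pvFilled, List.any_eq_true, List.mem_range, decide_eq_true_eq]
  refine ⟨j, hj, h1, ?_⟩
  rw [← pvBkt_length]
  rw [pvS_succ] at h2
  omega

theorem pvO_full (arr : List (List Int)) (rows : Int)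
    (hw : ∀ x ∈ arr, pvW rows x < rows.toNat) :
    pvO arr rows arr = pvF arr rows := by
  apply List.ext_getElem
  · simp [pvO, pvF_length, pvS_top arr rows hw]
  · intro i h1 h2
    simp only [pvO, List.getElem_map, List.getElem_range]
    have hi : i < arr.length := by simpa [pvO] using h1
    rw [if_pos (pvFilled_full arr rows hw i hi)]
    rw [List.getD_eq_getElem _ _ h2]

theorem pvGetD_range_map {α : Type} (n : Nat) (f : Nat → α) (j : Nat) (d : α) :
    ((List.range n).map f).getD j d = if j < n then f j else d := by
  by_cases h : j < n
  · rw [List.getD_eq_getElem _ _ (by simpa using h), if_pos h]; simp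
  · rw [List.getD_eq_default _ _ (by simpa using h), if_neg h]

theorem pvGetD_replicate {α : Type} (n : Nat) (d : α) (j : Nat) :
    (List.replicate n d).getD j d = d := by
  by_cases h : j < n
  · rw [List.getD_eq_getElem _ _ (by simpa using h)]; simp
  · rw [List.getD_eq_default _ _ (by simpa using h)]

theorem pvBkt_nil_of_ge (arr : List (List Int)) (rows : Int) (j : Nat)
    (hw : ∀ x ∈ arr, pvW rows x < rows.toNat) (hj : ¬ j < rows.toNat) :
    pvBkt arr rows j = [] := by
  rw [pvBkt, List.filter_eq_nil_iff]
  intro x hx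
  simp only [decide_eq_true_eq]
  intro h
  exact hj (h ▸ hw x hx)

theorem pv_q_lt (arr : List (List Int)) (rows : Int) (u v : List (List Int)) (a : List Int)
    (harr : arr = u ++ a :: v) (hw : ∀ x ∈ arr, pvW rows x < rows.toNat) :
    pvS arr rows (pvW rows a) + u.countP (fun x => decide (pvW rows x = pvW rows a))
      < arr.length := by
  have hmem : a ∈ arr := by rw [harr]; exact List.mem_append_right _ List.mem_cons_self
  have hb : pvW rows a < rows.toNat := hw a hmem
  have hsplit : pvBkt arr rows (pvW rows a)
      = pvBkt u rows (pvW rows a) ++ a :: pvBkt v rows (pvW rows a) := by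
    rw [harr, pvBkt, pvBkt, pvBkt, List.filter_append, List.filter_cons, if_pos (by simp)]
  have hlen : u.countP (fun x => decide (pvW rows x = pvW rows a)) + 1
      ≤ (pvBkt arr rows (pvW rows a)).length := by
    rw [hsplit, ← pvBkt_length]
    simp
  calc pvS arr rows (pvW rows a) + u.countP (fun x => decide (pvW rows x = pvW rows a))
      < pvS arr rows (pvW rows a) + (pvBkt arr rows (pvW rows a)).length := by omega
    _ = pvS arr rows (pvW rows a + 1) := (pvS_succ arr rows _).symm
    _ ≤ pvS arr rows rows.toNat := pvS_mono arr rows _ _ (by omega)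
    _ = arr.length := pvS_top arr rows hw

theorem pvF_at_q (arr : List (List Int)) (rows : Int) (u v : List (List Int)) (a : List Int)
    (harr : arr = u ++ a :: v) (hw : ∀ x ∈ arr, pvW rows x < rows.toNat) :
    (pvF arr rows).getD (pvS arr rows (pvW rows a)
      + u.countP (fun x => decide (pvW rows x = pvW rows a))) [] = a := by
  have hmem : a ∈ arr := by rw [harr]; exact List.mem_append_right _ List.mem_cons_self
  have hb : pvW rows a < rows.toNat := hw a hmem
  have hsplit : pvBkt arr rows (pvW rows a)
      = pvBkt u rows (pvW rows a) ++ a :: pvBkt v rows (pvW rows a) := by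
    rw [harr, pvBkt, pvBkt, pvBkt, List.filter_append, List.filter_cons, if_pos (by simp)]
  have hcu : u.countP (fun x => decide (pvW rows x = pvW rows a))
      = (pvBkt u rows (pvW rows a)).length := (pvBkt_length u rows _).symm
  have ht : u.countP (fun x => decide (pvW rows x = pvW rows a))
      < (pvBkt arr rows (pvW rows a)).length := by
    rw [hsplit, hcu]; simp
  rw [pvF_getD arr rows _ _ hb ht, hsplit, hcu,
    List.getD_append_right _ _ _ _ (Nat.le_refl _), Nat.sub_self, List.getD_cons_zero]

theorem pvO_step (arr : List (List Int)) (rows : Int) (u v : List (List Int)) (a : List Int)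
    (harr : arr = u ++ a :: v) (hw : ∀ x ∈ arr, pvW rows x < rows.toNat) :
    (pvO arr rows u).set
        (pvS arr rows (pvW rows a) + u.countP (fun x => decide (pvW rows x = pvW rows a))) a
      = pvO arr rows (u ++ [a]) := by
  have hmem : a ∈ arr := by rw [harr]; exact List.mem_append_right _ List.mem_cons_self
  have hb : pvW rows a < rows.toNat := hw a hmem
  have hq : pvS arr rows (pvW rows a) + u.countP (fun x => decide (pvW rows x = pvW rows a))
      < arr.length := pv_q_lt arr rows u v a harr hw
  rw [pvO, pvO, pvSet_range_map _ _ _ _ hq]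
  apply List.map_congr_left
  intro i hi
  rw [List.mem_range] at hi
  by_cases hiq : i = pvS arr rows (pvW rows a)
      + u.countP (fun x => decide (pvW rows x = pvW rows a))
  · rw [if_pos hiq, pvFilled_append arr rows u a i hb, if_pos (by simp [hiq]),
      hiq, pvF_at_q arr rows u v a harr hw]
  · rw [if_neg hiq, pvFilled_append arr rows u a i hb, decide_eq_false hiq, Bool.or_false]

theorem pvP_step (arr : List (List Int)) (rows : Int) (u : List (List Int)) (a : List Int)
    (hb : pvW rows a < rows.toNat) :
    (pvP arr rows u).set (pvW rows a)
        (((pvS arr rows (pvW rows a)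
            + u.countP (fun x => decide (pvW rows x = pvW rows a)) : Nat) : Int) + 1)
      = pvP arr rows (u ++ [a]) := by
  rw [pvP, pvP, pvSet_range_map _ _ _ _ hb]
  apply List.map_congr_left
  intro j hj
  by_cases hjb : j = pvW rows a
  · rw [if_pos hjb, hjb, List.countP_append]
    simp only [List.countP_cons, List.countP_nil, decide_true, if_true]
    push_cast
    ring
  · rw [if_neg hjb, List.countP_append]
    have : List.countP (fun x => decide (pvW rows x = j)) [a] = 0 := by
      simp only [List.countP_cons, List.countP_nil]
      rw [if_neg (by simpa using fun h => hjb (by omega))]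
  
    simp [this]

theorem pvConvA (rows : Int) (h0 : 0 ≤ rows) :
    ∀ (u : List (List Int)) (t : List (List (List Int))),
    (∀ x ∈ u, 2 ≤ x.length ∧ -rows ≤ pvKey x ∧ pvKey x < rows) → t.length = rows.toNat →
    u.foldl (fun t i => PySem.List.pySetD t (PySem.List.pyGetD i 1 0)
        (PySem.List.pyGetD t (PySem.List.pyGetD i 1 0) [] ++ [i])) t
    = u.foldl (fun t i => t.set (pvW rows i) (t.getD (pvW rows i) [] ++ [i])) t := by
  intro u
  induction u with
  | nil => intro t _ _; rfl
  | cons a u ih =>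
    intro t hx hlen
    obtain ⟨h2, hk1, hk2⟩ := hx a List.mem_cons_self
    rw [List.foldl_cons, List.foldl_cons]
    have e1 : PySem.List.pySetD t (PySem.List.pyGetD a 1 0)
        (PySem.List.pyGetD t (PySem.List.pyGetD a 1 0) [] ++ [a])
        = t.set (pvW rows a) (t.getD (pvW rows a) [] ++ [a]) := by
      rw [show PySem.List.pyGetD a 1 0 = pvKey a from rfl,
        pvGetD_wrap t rows _ _ hlen h0 hk1 hk2, pvSetD_wrap t rows _ _ hlen h0 hk1 hk2]
      rfl
    rw [e1]
    exact ih _ (fun x hx' => hx x (List.mem_cons_of_mem _ hx'))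
      (by rw [List.length_set, hlen])

theorem pvConvC (rows : Int) (h0 : 0 ≤ rows) :
    ∀ (u : List (List Int)) (t : List Int),
    (∀ x ∈ u, 2 ≤ x.length ∧ -rows ≤ pvKey x ∧ pvKey x < rows) → t.length = rows.toNat →
    u.foldl (fun c row => PySem.List.pySetD c (PySem.List.pyGetD row 1 0)
        (PySem.List.pyGetD c (PySem.List.pyGetD row 1 0) 0 + 1)) t
    = u.foldl (fun c row => c.set (pvW rows row) (c.getD (pvW rows row) 0 + 1)) t := by
  intro u
  induction u with
  | nil => intro t _ _; rfl
  | cons a u ih =>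
    intro t hx hlen
    obtain ⟨h2, hk1, hk2⟩ := hx a List.mem_cons_self
    rw [List.foldl_cons, List.foldl_cons]
    have e1 : PySem.List.pySetD t (PySem.List.pyGetD a 1 0)
        (PySem.List.pyGetD t (PySem.List.pyGetD a 1 0) 0 + 1)
        = t.set (pvW rows a) (t.getD (pvW rows a) 0 + 1) := by
      rw [show PySem.List.pyGetD a 1 0 = pvKey a from rfl,
        pvGetD_wrap t rows _ _ hlen h0 hk1 hk2, pvSetD_wrap t rows _ _ hlen h0 hk1 hk2]
      rfl
    rw [e1]
    exact ih _ (fun x hx' => hx x (List.mem_cons_of_mem _ hx'))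
      (by rw [List.length_set, hlen])

theorem pvPlace (arr : List (List Int)) (rows : Int) (h0 : 0 ≤ rows) (hx : pvGood arr rows) :
    ∀ (v u : List (List Int)), arr = u ++ v →
    ((v.foldl (fun (st : List (List Int) × List Int) row =>
        let q := PySem.List.pyGetD st.2 (PySem.List.pyGetD row 1 0) 0
        (PySem.List.pySetD st.1 q row,
         PySem.List.pySetD st.2 (PySem.List.pyGetD row 1 0) (q + 1)))
      (pvO arr rows u, pvP arr rows u)).1) = pvO arr rows arr := by
  intro v
  induction v with
  | nil =>
    intro u harr
    rw [List.append_nil] at harr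
    subst harr
    rfl
  | cons a v ih =>
    intro u harr
    have hmem : a ∈ arr := by rw [harr]; exact List.mem_append_right _ List.mem_cons_self
    obtain ⟨h2, hk1, hk2⟩ := hx a hmem
    have hw : ∀ x ∈ arr, pvW rows x < rows.toNat :=
      fun x hx' => pvW_lt rows x h0 (hx x hx').2.1 (hx x hx').2.2
    have hb : pvW rows a < rows.toNat := hw a hmem
    have hplen : (pvP arr rows u).length = rows.toNat := by simp [pvP]
    have hread : PySem.List.pyGetD (pvP arr rows u) (PySem.List.pyGetD a 1 0) 0
        = ((pvS arr rows (pvW rows a)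
            + u.countP (fun x => decide (pvW rows x = pvW rows a)) : Nat) : Int) := by
      rw [show PySem.List.pyGetD a 1 0 = pvKey a from rfl,
        pvGetD_wrap _ rows _ _ hplen h0 hk1 hk2]
      show (pvP arr rows u).getD (pvW rows a) 0 = _
      rw [pvP, pvGetD_range_map, if_pos hb]
    have hstep :
        (let q := PySem.List.pyGetD (pvO arr rows u, pvP arr rows u).2 (PySem.List.pyGetD a 1 0) 0
         (PySem.List.pySetD (pvO arr rows u, pvP arr rows u).1 q a,
          PySem.List.pySetD (pvO arr rows u, pvP arr rows u).2 (PySem.List.pyGetD a 1 0) (q + 1)))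
        = (pvO arr rows (u ++ [a]), pvP arr rows (u ++ [a])) := by
      show (PySem.List.pySetD (pvO arr rows u)
              (PySem.List.pyGetD (pvP arr rows u) (PySem.List.pyGetD a 1 0) 0) a,
            PySem.List.pySetD (pvP arr rows u) (PySem.List.pyGetD a 1 0)
              (PySem.List.pyGetD (pvP arr rows u) (PySem.List.pyGetD a 1 0) 0 + 1)) = _
      rw [hread, Prod.mk.injEq]
      constructor
      · rw [PySem.List.pySetD_natCast]
        exact pvO_step arr rows u v a harr hw
      · rw [show PySem.List.pyGetD a 1 0 = pvKey a from rfl,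
          pvSetD_wrap _ rows _ _ hplen h0 hk1 hk2]
        exact pvP_step arr rows u a hb
    rw [List.foldl_cons, hstep]
    exact ih (u ++ [a]) (by rw [harr, List.append_cons])

theorem pvA_char (arr : List (List Int)) (rows : Int) (h0 : 0 ≤ rows) (hx : pvGood arr rows) :
    transform arr rows = pvF arr rows := by
  have hw : ∀ x ∈ arr, pvW rows x < rows.toNat :=
    fun x h => pvW_lt rows x h0 (hx x h).2.1 (hx x h).2.2
  show (arr.foldl (fun t i => PySem.List.pySetD t (PySem.List.pyGetD i 1 0)
      (PySem.List.pyGetD t (PySem.List.pyGetD i 1 0) [] ++ [i]))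
      ((PySem.List.pyRange 0 rows 1).map (fun _ => ([] : List (List Int))))).foldl
      (fun a i => i.foldl (fun a j => a ++ [j]) a) [] = pvF arr rows
  have hlen0 : ((PySem.List.pyRange 0 rows 1).map (fun _ => ([] : List (List Int)))).length
      = rows.toNat := by
    rw [List.length_map, PySem.List.length_pyRange_one]; simp
  rw [pvConvA rows h0 arr _ hx hlen0]
  have htempF : arr.foldl (fun t i => t.set (pvW rows i) (t.getD (pvW rows i) [] ++ [i]))
        ((PySem.List.pyRange 0 rows 1).map (fun _ => ([] : List (List Int))))
      = (List.range rows.toNat).map (pvBkt arr rows) := by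
    apply pvEq_of_getD _ _ ([] : List (List Int))
    · rw [(pvScatter_length (pvW rows) (fun acc (i : List Int) => acc ++ [i])
        ([] : List (List Int)) arr _ : _ = _), hlen0]
      simp
    · intro j
      refine ((pvScatter (pvW rows) (fun acc (i : List Int) => acc ++ [i])
          ([] : List (List Int)) arr _ j ?_ : _ = _)).trans ?_
      · rw [hlen0]; exact hw
      · rw [pvGetD_map_const, PySem.List.foldl_append_singleton, List.nil_append,
          pvGetD_range_map]
        have hfil : arr.filter (fun x => decide (pvW rows x = j)) = pvBkt arr rows j := rfl
        rw [hfil]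
        by_cases hj : j < rows.toNat
        · rw [if_pos hj]
        · rw [if_neg hj, pvBkt_nil_of_ge arr rows j hw hj]
  rw [htempF]
  rw [show (fun (a i : List (List Int)) => i.foldl (fun a j => a ++ [j]) a)
      = (fun (a i : List (List Int)) => a ++ i) from
    funext fun a => funext fun i => PySem.List.foldl_append_singleton i a]
  rw [PySem.List.foldl_append_eq_flatMap (fun i : List (List Int) => i)]
  simp [pvF, List.flatMap_id']

theorem pvB_char (arr : List (List Int)) (rows : Int) (h0 : 0 ≤ rows) (hx : pvGood arr rows) :
    transform_alt arr rows = pvF arr rows := by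
  have hw : ∀ x ∈ arr, pvW rows x < rows.toNat :=
    fun x h => pvW_lt rows x h0 (hx x h).2.1 (hx x h).2.2
  show (arr.foldl (fun (st : List (List Int) × List Int) row =>
      let q := PySem.List.pyGetD st.2 (PySem.List.pyGetD row 1 0) 0
      (PySem.List.pySetD st.1 q row,
       PySem.List.pySetD st.2 (PySem.List.pyGetD row 1 0) (q + 1)))
      (List.replicate arr.length [],
        ((arr.foldl (fun c row => PySem.List.pySetD c (PySem.List.pyGetD row 1 0)
            (PySem.List.pyGetD c (PySem.List.pyGetD row 1 0) 0 + 1))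
          (List.replicate rows.toNat 0)).foldl
          (fun (pt : List Int × Int) c => (pt.1 ++ [pt.2], pt.2 + c)) ([], 0)).1)).1
    = pvF arr rows
  rw [pvConvC rows h0 arr _ hx (by simp)]
  have hcount : arr.foldl
        (fun c row => c.set (pvW rows row) (c.getD (pvW rows row) 0 + 1))
        (List.replicate rows.toNat 0)
      = (List.range rows.toNat).map (fun j => ((pvBkt arr rows j).length : Int)) := by
    apply pvEq_of_getD _ _ (0 : Int)
    · rw [(pvScatter_length (pvW rows) (fun acc (_ : List Int) => acc + 1)
        (0 : Int) arr _ : _ = _)]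
      simp
    · intro j
      refine ((pvScatter (pvW rows) (fun acc (_ : List Int) => acc + 1)
          (0 : Int) arr _ j ?_ : _ = _)).trans ?_
      · rw [List.length_replicate]; exact hw
      · rw [pvGetD_replicate, pvFoldl_add_one, pvGetD_range_map]
        have hfil : arr.filter (fun x => decide (pvW rows x = j)) = pvBkt arr rows j := rfl
        rw [hfil]
        by_cases hj : j < rows.toNat
        · rw [if_pos hj]; simp
        · rw [if_neg hj, pvBkt_nil_of_ge arr rows j hw hj]; simp
  rw [hcount, pvPrefixFold]
  show (arr.foldl _ (List.replicate arr.length [],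
      [] ++ (List.range ((List.range rows.toNat).map
          (fun j => ((pvBkt arr rows j).length : Int))).length).map
        (fun j => 0 + (((List.range rows.toNat).map
          (fun j => ((pvBkt arr rows j).length : Int))).take j).sum))).1 = pvF arr rows
  have hpos : ([] : List Int) ++ (List.range ((List.range rows.toNat).map
        (fun j => ((pvBkt arr rows j).length : Int))).length).map
        (fun j => 0 + (((List.range rows.toNat).map
          (fun j => ((pvBkt arr rows j).length : Int))).take j).sum)
      = pvP arr rows [] := by
    rw [List.nil_append, List.length_map, List.length_range, pvP]
    apply List.map_congr_left
    intro j hj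
    rw [List.mem_range] at hj
    rw [← List.map_take, List.take_range, Nat.min_eq_left (by omega)]
    have : (List.range j).map (fun j' => ((pvBkt arr rows j').length : Int))
        = ((List.range j).map (fun j' => (pvBkt arr rows j').length)).map
            (Nat.cast : Nat → Int) := by
      rw [List.map_map]; rfl
    rw [this, pvCast_sum]
    show 0 + ((pvS arr rows j : Nat) : Int) = _
    simp
  rw [hpos]
  have hO0 : List.replicate arr.length ([] : List Int) = pvO arr rows [] := by
    simp [pvO, pvFilled_nil]
  rw [hO0]
  rw [pvPlace arr rows h0 hx arr [] (by simp)]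
  exact pvO_full arr rows hw

theorem pvA_nil (rows : Int) : transform [] rows = [] := by
  show ((PySem.List.pyRange 0 rows 1).map (fun _ => ([] : List (List Int)))).foldl
      (fun a i => i.foldl (fun a j => a ++ [j]) a) [] = []
  rw [List.foldl_map]
  exact pvFoldl_const _ _

-- ===== VERDICT (by name: the statement is the Claim_ definition above) =====
theorem transform_spec : Claim_equal_transform := by
  intro arr rows _ hpre
  unfold Spec_transform
  obtain ⟨hor, hx⟩ := hpre
  by_cases h0 : 0 ≤ rows
  · have hgood : pvGood arr rows := hx
    rw [pvA_char arr rows h0 hgood, pvB_char arr rows h0 hgood]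
  · have harr : arr = [] := by
      rcases hor with h | h
      · exact h
      · omega
    subst harr
    rw [pvA_nil]
    rfl
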